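-- pv_equiv track=rewrite | github.com/Alrefa3ee/Training | 2021/problemG.py | get_packets
-- ===== SOURCE A (Python) =====
-- def get_packet(items: list, ability: int) -> list:
--     packet = []
--     for item in items:
--         if sum(packet) + item <= ability:
--             packet.append(item)
--     return packet
--
-- def get_packets(items: list, ability: int, packet_count: int) -> list:
--     packets = []
--     for i in range(packet_count):
--         packet = get_packet(items, ability)
--         packets.append(packet)
--         for item in packet:
--             items.remove(item)
--     return packets
-- ===== SOURCE B (Python) =====
-- def get_packets(items: list, ability: int, packet_count: int) -> list:
--     packets = []
--     for _ in range(packet_count):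
--         packet = []
--         total = 0
--         need = {}
--         for item in items:
--             if total + item <= ability:
--                 packet.append(item)
--                 total += item
--                 need[item] = need.get(item, 0) + 1
--         remaining = []
--         for item in items:
--             if need.get(item, 0) > 0:
--                 need[item] = need[item] - 1
--             else:
--                 remaining.append(item)
--         packets.append(packet)
--         items[:] = remaining
--     return packets
-- ===== Notes on version B (the rewrite author's own statement) =====
-- stated objective: alternative
-- what changed: Each round keeps a running total instead of re-summing the packet per item, and removes the selected items with a single counter-based multiset-subtraction pass over items instead of one list.remove scan per selected item.
import Mathlib
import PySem

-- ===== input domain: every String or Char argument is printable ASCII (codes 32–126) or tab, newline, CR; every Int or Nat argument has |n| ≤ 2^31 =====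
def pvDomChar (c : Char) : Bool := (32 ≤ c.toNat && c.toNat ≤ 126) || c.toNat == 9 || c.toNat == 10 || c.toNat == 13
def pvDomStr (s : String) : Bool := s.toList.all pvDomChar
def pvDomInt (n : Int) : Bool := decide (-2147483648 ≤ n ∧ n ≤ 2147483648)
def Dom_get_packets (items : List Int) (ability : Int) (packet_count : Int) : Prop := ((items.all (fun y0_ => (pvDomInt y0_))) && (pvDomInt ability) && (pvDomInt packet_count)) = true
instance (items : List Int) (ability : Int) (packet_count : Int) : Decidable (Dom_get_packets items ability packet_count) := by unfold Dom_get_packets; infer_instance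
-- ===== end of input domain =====

-- B replaces A's per-round mechanism (sum(packet) recomputed per item, one .remove scan per
-- selected item) by a running total plus a counter-based multiset-subtraction pass; equal return
-- value AND equal in-place mutation of `items`.

-- ===== PORT A =====
-- loop body of get_packet: packet.append(item) if sum(packet)+item<=ability
def pvGetPacketF (ability : Int) (packet : List Int) (item : Int) : List Int :=
  if packet.sum + item ≤ ability then packet ++ [item] else packet

def get_packet (items : List Int) (ability : Int) : List Int :=
  items.foldl (pvGetPacketF ability) []

-- 'for item in packet: items.remove(item)'. list.remove raises ValueError only when the value is
-- absent, which never happens here (packet is selected from items), so the `.getD its` default is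
-- unreachable.
def pvRemoveAll (its : List Int) (packet : List Int) : List Int :=
  packet.foldl (fun its item => (PySem.List.remove? its item).getD its) its

def pvStepA (ability : Int) (st : List (List Int) × List Int) (_ : Int) :
    List (List Int) × List Int :=
  let packet := get_packet st.2 ability
  (st.1 ++ [packet], pvRemoveAll st.2 packet)

def get_packets (items : List Int) (ability : Int) (packet_count : Int) : List (List Int) :=
  ((PySem.List.pyRange 0 packet_count 1).foldl (pvStepA ability) ([], items)).1

-- ===== PORT B =====
-- selection pass: state (packet, total, need); need[item] = need.get(item,0)+1 on selection
def pvSelF (ability : Int) (acc : List Int × Int × PySem.Dict Int Int) (item : Int) :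
    List Int × Int × PySem.Dict Int Int :=
  if acc.2.1 + item ≤ ability then
    (acc.1 ++ [item], acc.2.1 + item, acc.2.2.insert item (acc.2.2.getD item 0 + 1))
  else acc

-- filter pass: state (need, remaining)
def pvFilF (acc : PySem.Dict Int Int × List Int) (item : Int) :
    PySem.Dict Int Int × List Int :=
  if acc.1.getD item 0 > 0 then (acc.1.insert item (acc.1.getD item 0 - 1), acc.2)
  else (acc.1, acc.2 ++ [item])

def pvStepB (ability : Int) (st : List (List Int) × List Int) (_ : Int) :
    List (List Int) × List Int :=
  let sel := st.2.foldl (pvSelF ability) ([], 0, PySem.Dict.empty)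
  let fil := st.2.foldl pvFilF (sel.2.2, [])
  (st.1 ++ [sel.1], fil.2)

def get_packets_alt (items : List Int) (ability : Int) (packet_count : Int) : List (List Int) :=
  ((PySem.List.pyRange 0 packet_count 1).foldl (pvStepB ability) ([], items)).1

-- ===== PRECONDITION & SPEC =====
def Spec_get_packets (items : List Int) (ability : Int) (packet_count : Int) (out : List (List Int)) : Prop := out = get_packets_alt items ability packet_count
instance (items : List Int) (ability : Int) (packet_count : Int) (out : List (List Int)) : Decidable (Spec_get_packets items ability packet_count out) := by unfold Spec_get_packets; infer_instance

-- ===== CLAIM (what is proved, stated in full; the proofs are below) =====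
def Claim_equal_get_packets : Prop := ∀ (items : List Int) (ability : Int) (packet_count : Int), Dom_get_packets items ability packet_count → Spec_get_packets items ability packet_count (get_packets items ability packet_count)

-- ===== LEMMAS AND PROOFS =====

-- B's selection fold, started with total = packet.sum, tracks A's get_packet fold in its first
-- component, keeps the sum invariant, and counts the newly selected items in its dict.
lemma sel_fst (ability : Int) : ∀ (items pk : List Int) (d : PySem.Dict Int Int),
    (items.foldl (pvSelF ability) (pk, pk.sum, d)).1 = items.foldl (pvGetPacketF ability) pk := by
  intro items
  induction items with
  | nil => intro pk d; rfl
  | cons x xs ih =>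
    intro pk d
    simp only [List.foldl_cons, pvSelF, pvGetPacketF]
    by_cases h : pk.sum + x ≤ ability
    · simp only [h, if_pos]
      have : (pk ++ [x]).sum = pk.sum + x := by simp
      rw [show ((pk ++ [x], pk.sum + x, d.insert x (d.getD x 0 + 1)) :
            List Int × Int × PySem.Dict Int Int)
          = (pk ++ [x], (pk ++ [x]).sum, d.insert x (d.getD x 0 + 1)) by rw [this]]
      exact ih (pk ++ [x]) _
    · simp only [h, if_neg, not_false_iff]
      exact ih pk d

lemma sel_dict (ability : Int) : ∀ (items pk : List Int) (d : PySem.Dict Int Int) (v : Int),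
    ((items.foldl (pvSelF ability) (pk, pk.sum, d)).2.2).getD v 0
      = d.getD v 0 + ((items.foldl (pvGetPacketF ability) pk).count v : Int) - (pk.count v : Int) := by
  intro items
  induction items with
  | nil => intro pk d v; simp
  | cons x xs ih =>
    intro pk d v
    simp only [List.foldl_cons, pvSelF, pvGetPacketF]
    by_cases h : pk.sum + x ≤ ability
    · simp only [h, if_pos]
      have hsum : (pk ++ [x]).sum = pk.sum + x := by simp
      rw [show ((pk ++ [x], pk.sum + x, d.insert x (d.getD x 0 + 1)) :
            List Int × Int × PySem.Dict Int Int)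
          = (pk ++ [x], (pk ++ [x]).sum, d.insert x (d.getD x 0 + 1)) by rw [hsum]]
      rw [ih (pk ++ [x]) (d.insert x (d.getD x 0 + 1)) v]
      rw [PySem.Dict.getD_insert]
      by_cases hv : v = x
      · subst hv
        simp [List.count_append]
        omega
      · simp [hv, Ne.symm hv, List.count_append]
    · simp only [h, if_neg, not_false_iff]
      exact ih pk d v

-- counter-filter as a recursive function (spec of B's second pass)
def bagFilter (d : PySem.Dict Int Int) : List Int → List Int
  | [] => []
  | x :: xs =>
    if d.getD x 0 > 0 then bagFilter (d.insert x (d.getD x 0 - 1)) xs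
    else x :: bagFilter d xs

lemma bagFilter_congr : ∀ (xs : List Int) (d d' : PySem.Dict Int Int),
    (∀ v, d.getD v 0 = d'.getD v 0) → bagFilter d xs = bagFilter d' xs := by
  intro xs
  induction xs with
  | nil => intro d d' _; rfl
  | cons x xs ih =>
    intro d d' h
    simp only [bagFilter, h x]
    by_cases hx : d'.getD x 0 > 0
    · simp only [hx, if_pos]
      apply ih
      intro v
      rw [PySem.Dict.getD_insert, PySem.Dict.getD_insert]
      by_cases hv : v = x <;> simp [hv, h v]
    · simp only [hx, if_neg, not_false_iff]
      rw [ih d d' h]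

lemma filter_spec : ∀ (xs : List Int) (d : PySem.Dict Int Int) (acc : List Int),
    (xs.foldl pvFilF (d, acc)).2 = acc ++ bagFilter d xs := by
  intro xs
  induction xs with
  | nil => intro d acc; simp [bagFilter]
  | cons x xs ih =>
    intro d acc
    simp only [List.foldl_cons, pvFilF, bagFilter]
    by_cases h : d.getD x 0 > 0
    · simp only [h, if_pos]
      exact ih _ acc
    · simp only [h, if_neg, not_false_iff]
      rw [ih d (acc ++ [x])]
      simp

lemma bagFilter_zero : ∀ (xs : List Int) (d : PySem.Dict Int Int),
    (∀ v, d.getD v 0 ≤ 0) → bagFilter d xs = xs := by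
  intro xs
  induction xs with
  | nil => intro d _; rfl
  | cons x xs ih =>
    intro d h
    have : ¬ d.getD x 0 > 0 := by have := h x; omega
    simp only [bagFilter, this, if_neg, not_false_iff]
    rw [ih d h]

lemma bagFilter_erase : ∀ (xs : List Int) (d : PySem.Dict Int Int) (p : Int),
    1 ≤ d.getD p 0 →
    bagFilter d xs = bagFilter (d.insert p (d.getD p 0 - 1)) (xs.erase p) := by
  intro xs
  induction xs with
  | nil => intro d p _; rfl
  | cons x xs ih =>
    intro d p hp
    by_cases hx : x = p
    · subst hx
      rw [List.erase_cons_head]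
      have : d.getD x 0 > 0 := by omega
      simp only [bagFilter, this, if_pos]
    · rw [List.erase_cons_tail (by simpa using hx)]
      have hgx : (d.insert p (d.getD p 0 - 1)).getD x 0 = d.getD x 0 := by
        rw [PySem.Dict.getD_insert]; simp [hx]
      by_cases h : d.getD x 0 > 0
      · simp only [bagFilter, h, hgx, if_pos]
        have hp' : 1 ≤ (d.insert x (d.getD x 0 - 1)).getD p 0 := by
          rw [PySem.Dict.getD_insert]; simp [Ne.symm hx, hp]
        rw [ih (d.insert x (d.getD x 0 - 1)) p hp']
        apply bagFilter_congr
        intro v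
        rw [PySem.Dict.getD_insert, PySem.Dict.getD_insert, PySem.Dict.getD_insert,
            PySem.Dict.getD_insert, PySem.Dict.getD_insert]
        by_cases hvp : v = p <;> by_cases hvx : v = x <;>
          simp [hvp, hvx, hx, Ne.symm hx] at *
      · simp only [bagFilter, h, hgx, if_neg, not_false_iff]
        rw [ih d p hp]

lemma eraseAll_eq_bagFilter : ∀ (pk xs : List Int) (d : PySem.Dict Int Int),
    (∀ v, d.getD v 0 = (pk.count v : Int)) →
    pk.foldl (fun l p => l.erase p) xs = bagFilter d xs := by
  intro pk
  induction pk with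
  | nil =>
    intro xs d h
    simp only [List.foldl_nil]
    rw [bagFilter_zero xs d (fun v => by rw [h v]; simp)]
  | cons p rest ih =>
    intro xs d h
    have hp : 1 ≤ d.getD p 0 := by
      rw [h p]
      have : 0 < (p :: rest).count p := List.count_pos_iff.mpr (List.mem_cons_self ..)
      omega
    simp only [List.foldl_cons]
    rw [ih (xs.erase p) (d.insert p (d.getD p 0 - 1)) ?_, ← bagFilter_erase xs d p hp]
    intro v
    rw [PySem.Dict.getD_insert]
    have hc := h v
    have hcp := h p
    by_cases hv : v = p <;> simp [hv, List.count_cons] at hc hcp ⊢ <;> omega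

lemma removeD_eq_erase (xs : List Int) (v : Int) :
    (PySem.List.remove? xs v).getD xs = xs.erase v := by
  by_cases h : v ∈ xs
  · rw [PySem.List.remove?_eq_some_erase xs v h]; rfl
  · rw [(PySem.List.remove?_eq_none_iff xs v).mpr h, List.erase_of_not_mem h]; rfl

lemma removeAll_eq_eraseFold : ∀ (pk xs : List Int),
    pvRemoveAll xs pk = pk.foldl (fun l p => l.erase p) xs := by
  intro pk
  induction pk with
  | nil => intro xs; rfl
  | cons p rest ih =>
    intro xs
    simp only [pvRemoveAll, List.foldl_cons] at *
    rw [removeD_eq_erase]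
    exact ih (xs.erase p)

lemma step_eq (ability : Int) (st : List (List Int) × List Int) (x : Int) :
    pvStepA ability st x = pvStepB ability st x := by
  simp only [pvStepA, pvStepB]
  have hfst : (st.2.foldl (pvSelF ability) ([], 0, PySem.Dict.empty)).1
      = get_packet st.2 ability := by
    simpa [get_packet] using sel_fst ability st.2 [] PySem.Dict.empty
  have hdict : ∀ v, ((st.2.foldl (pvSelF ability) ([], 0, PySem.Dict.empty)).2.2).getD v 0
      = ((get_packet st.2 ability).count v : Int) := by
    intro v
    simpa [get_packet] using sel_dict ability st.2 [] PySem.Dict.empty v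
  simp only [Prod.mk.injEq]
  refine ⟨by rw [hfst], ?_⟩
  rw [filter_spec, List.nil_append,
      ← eraseAll_eq_bagFilter (get_packet st.2 ability) st.2 _ hdict,
      removeAll_eq_eraseFold]

-- ===== VERDICT (by name: the statement is the Claim_ definition above) =====
theorem get_packets_spec : Claim_equal_get_packets := by
  intro items ability packet_count _
  unfold Spec_get_packets get_packets get_packets_alt
  rw [show pvStepA ability = pvStepB ability from funext fun st => funext fun x => step_eq ability st x]
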